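-- pv_equiv track=rewrite | github.com/eastmeet/pmp | 백준/Bronze/3003. 킹， 퀸， 룩， 비숍， 나이트， 폰/킹， 퀸， 룩， 비숍， 나이트， 폰.py | countPawn
-- ===== SOURCE A (Python) =====
-- def countPawn(object):
-- 	num = 0
-- 	if object == 8:
-- 		return num
-- 	while object != 8:
-- 		if object > 8:
-- 			object = object - 1
-- 			num = num - 1
-- 		else:
-- 			object = object + 1
-- 			num = num + 1
-- 	return num
-- ===== SOURCE B (Python) =====
-- def countPawn(object):
--     return 8 - object
-- ===== Notes on version B (the rewrite author's own statement) =====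
-- stated objective: simpler
-- what changed: Replaced the step-by-step counting loop toward 8 with the closed form 8 - object.
import Mathlib
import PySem

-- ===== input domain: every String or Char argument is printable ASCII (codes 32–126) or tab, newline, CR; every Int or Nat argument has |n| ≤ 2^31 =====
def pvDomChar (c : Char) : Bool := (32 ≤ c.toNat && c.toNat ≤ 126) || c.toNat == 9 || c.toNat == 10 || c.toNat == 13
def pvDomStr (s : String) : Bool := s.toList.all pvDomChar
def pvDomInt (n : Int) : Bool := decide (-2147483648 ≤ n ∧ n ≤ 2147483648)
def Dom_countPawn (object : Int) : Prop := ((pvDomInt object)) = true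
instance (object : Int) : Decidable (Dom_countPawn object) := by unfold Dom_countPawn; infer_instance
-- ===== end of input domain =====

-- ===== PORT A =====
-- A walks `object` one step at a time toward 8, accumulating the signed step count.
def countPawnLoop (object num : Int) : Int :=
  if h : object = 8 then num
  else if object > 8 then countPawnLoop (object - 1) (num - 1)
  else countPawnLoop (object + 1) (num + 1)
termination_by (object - 8).natAbs
decreasing_by
  · omega
  · omega

def countPawn (object : Int) : Int :=
  if object = 8 then 0 else countPawnLoop object 0

-- ===== PORT B =====
-- B: closed form, no loop.
def countPawn_alt (object : Int) : Int := 8 - object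

-- ===== PRECONDITION & SPEC =====
def Spec_countPawn (object : Int) (out : Int) : Prop := out = countPawn_alt object
instance (object : Int) (out : Int) : Decidable (Spec_countPawn object out) := by unfold Spec_countPawn; infer_instance

-- ===== CLAIM (what is proved, stated in full; the proofs are below) =====
def Claim_equal_countPawn : Prop := ∀ (object : Int), Dom_countPawn object → Spec_countPawn object (countPawn object)

-- ===== LEMMAS AND PROOFS =====

-- ===== VERDICT (by name: the statement is the Claim_ definition above) =====
theorem countPawnLoop_eq (object num : Int) : countPawnLoop object num = num + (8 - object) := by
  fun_induction countPawnLoop object num <;> omega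

theorem countPawn_spec : Claim_equal_countPawn := by
  intro object _
  unfold Spec_countPawn countPawn countPawn_alt
  split <;> simp_all [countPawnLoop_eq]
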